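-- pv_equiv track=rewrite | github.com/eggsacc/CS1010X-2025 | 7/mission 7.1/sidequest07.1-template.py | block
-- ===== SOURCE A (Python) =====
-- def block(n):
--     seqs = []
--     a = [1, 1, 1, 1]
--     b = [1, 0, 1, 0]
--     c = [1, 1, 0, 0]
--     d = [1, 0, 0, 0]
--     prev_mat = [a, b, c, d]
--     new_mat = []
--     i = 4
--     while i < n:
--         new_mat = []
--         for item in prev_mat:
--             new_mat.append(item *2)
--         for item in prev_mat:
--             new_mat.append(item + [0 for k in range(len(item))])
--         prev_mat = new_mat
--         i *= 2
--     return new_mat[1:]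
-- ===== SOURCE B (Python) =====
-- def block(n):
--     if n <= 4:
--         return []
--     S = 4
--     while S < n:
--         S *= 2
--     # Sierpinski bit rule: cell (i, j) is 1 iff i & j == 0; row 0 (all ones) omitted.
--     return [[1 if i & j == 0 else 0 for j in range(S)] for i in range(1, S)]
-- ===== Notes on version B (the rewrite author's own statement) =====
-- stated objective: simpler
-- what changed: Replaces the iterative block-doubling construction (which builds every intermediate matrix) with the closed-form Sierpinski bit rule: after finding the final size (the smallest admissible power of two reaching n) it emits each cell directly as one iff the row index and column index share no set bit, omitting the first all-ones row.
import Mathlib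
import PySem

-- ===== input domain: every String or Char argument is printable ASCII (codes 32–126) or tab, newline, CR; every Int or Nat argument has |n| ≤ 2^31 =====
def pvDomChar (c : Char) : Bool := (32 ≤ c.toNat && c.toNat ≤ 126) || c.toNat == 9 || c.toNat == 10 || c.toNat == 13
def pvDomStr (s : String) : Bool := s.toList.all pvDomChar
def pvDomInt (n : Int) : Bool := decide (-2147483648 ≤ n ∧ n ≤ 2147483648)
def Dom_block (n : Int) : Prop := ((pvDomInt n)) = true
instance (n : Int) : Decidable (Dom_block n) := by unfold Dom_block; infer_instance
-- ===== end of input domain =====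

-- B replaces A's iterative block doubling with the closed-form Sierpinski bit rule
-- (cell (i,j) = 1 iff i & j == 0) at the final size; objective: simpler (no intermediate matrices).

-- ===== PORT A =====
-- one pass of A's while-body: new_mat = [item*2 for item] ++ [item + [0]*len(item) for item]
def blockDouble (prev : List (List Int)) : List (List Int) :=
  prev.map (fun item => item ++ item) ++
    prev.map (fun item => item ++ List.replicate item.length 0)  -- [0 for k in range(len(item))]

-- A's while loop; terminates because i doubles (i ≥ 4) while n is fixed
def blockLoop (n : Int) (prev newm : List (List Int)) (i : Int) (hi : 4 ≤ i) :
    List (List Int) :=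
  if h : i < n then
    blockLoop n (blockDouble prev) (blockDouble prev) (2 * i) (by omega)
  else newm
termination_by (n - i).toNat
decreasing_by omega

def block (n : Int) : List (List Int) :=
  PySem.List.slice
    (blockLoop n [[1,1,1,1],[1,0,1,0],[1,1,0,0],[1,0,0,0]] [] 4 (by norm_num))
    (some 1) none   -- new_mat[1:]

-- ===== PORT B =====
-- Source B's while loop: S = 4; while S < n: S *= 2
def sizeLoop (n S : Int) (hS : 0 < S) : Int :=
  if h : S < n then sizeLoop n (2 * S) (by omega) else S
termination_by (n - S).toNat
decreasing_by omega

def block_alt (n : Int) : List (List Int) :=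
  if n ≤ 4 then []
  else
    let S := sizeLoop n 4 (by norm_num)
    (PySem.List.pyRange 1 S 1).map (fun i =>
      (PySem.List.pyRange 0 S 1).map (fun j => if Int.land i j = 0 then (1:Int) else 0))

-- ===== PRECONDITION & SPEC =====
def Spec_block (n : Int) (out : List (List Int)) : Prop := out = block_alt n
instance (n : Int) (out : List (List Int)) : Decidable (Spec_block n out) := by unfold Spec_block; infer_instance

-- ===== CLAIM (what is proved, stated in full; the proofs are below) =====
def Claim_equal_block : Prop := ∀ (n : Int), Dom_block n → Spec_block n (block n)

-- ===== LEMMAS AND PROOFS =====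

-- closed-form matrix over Nat indices, size 2^m
def natRow (m i : Nat) : List Int :=
  (List.range (2 ^ m)).map (fun j => if i &&& j = 0 then (1:Int) else 0)
def natMat (m : Nat) : List (List Int) := (List.range (2 ^ m)).map (natRow m)

-- closed-form matrix over Int size, matching block_alt's comprehension (including row 0)
def intRow (S i : Int) : List Int :=
  (PySem.List.pyRange 0 S 1).map (fun j => if Int.land i j = 0 then (1:Int) else 0)
def intMat (S : Int) : List (List Int) := (PySem.List.pyRange 0 S 1).map (intRow S)

theorem land_low_high {m i j : Nat} (hi : i < 2 ^ m) (_hj : j < 2 ^ m) :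
    i &&& (2 ^ m + j) = i &&& j := by
  apply Nat.eq_of_testBit_eq
  intro b
  simp only [Nat.testBit_and]
  rcases lt_or_ge b m with hb | hb
  · rw [Nat.testBit_two_pow_add_gt hb]
  · have : i.testBit b = false :=
      Nat.testBit_lt_two_pow (lt_of_lt_of_le hi (Nat.pow_le_pow_right (by norm_num) hb))
    simp [this]

theorem land_high_low {m i j : Nat} (hi : i < 2 ^ m) (hj : j < 2 ^ m) :
    (2 ^ m + i) &&& j = i &&& j := by
  rw [Nat.land_comm, land_low_high hj hi, Nat.land_comm]

theorem land_high_high {m i j : Nat} (hi : i < 2 ^ m) (hj : j < 2 ^ m) :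
    (2 ^ m + i) &&& (2 ^ m + j) ≠ 0 := by
  intro h
  have hb : ((2 ^ m + i) &&& (2 ^ m + j)).testBit m = false := by rw [h]; simp
  rw [Nat.testBit_and, Nat.testBit_two_pow_add_eq, Nat.testBit_two_pow_add_eq,
      Nat.testBit_lt_two_pow hi, Nat.testBit_lt_two_pow hj] at hb
  simp at hb

theorem natRow_double_low {m i : Nat} (hi : i < 2 ^ m) :
    natRow (m + 1) i = natRow m i ++ natRow m i := by
  unfold natRow
  rw [pow_succ, mul_two, List.range_add, List.map_append, List.map_map]
  congr 1
  apply List.map_congr_left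
  intro j hj
  simp only [List.mem_range] at hj
  simp [land_low_high hi hj]

theorem natRow_double_high {m i : Nat} (hi : i < 2 ^ m) :
    natRow (m + 1) (2 ^ m + i) = natRow m i ++ List.replicate (natRow m i).length 0 := by
  unfold natRow
  rw [pow_succ, mul_two, List.range_add, List.map_append, List.map_map]
  congr 1
  · apply List.map_congr_left
    intro j hj
    simp only [List.mem_range] at hj
    simp [land_high_low hi hj]
  · rw [List.length_map, List.length_range, List.eq_replicate_iff]
    refine ⟨by simp, ?_⟩
    intro x hx
    simp only [List.mem_map, List.mem_range, Function.comp] at hx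
    obtain ⟨j, hj, hx⟩ := hx
    rw [if_neg (land_high_high hi hj)] at hx
    exact hx.symm

theorem blockDouble_natMat (m : Nat) : blockDouble (natMat m) = natMat (m + 1) := by
  unfold blockDouble natMat
  rw [pow_succ, mul_two, List.range_add, List.map_append, List.map_map, List.map_map,
      List.map_map]
  congr 1
  · apply List.map_congr_left
    intro i hi
    simp only [List.mem_range] at hi
    exact (natRow_double_low hi).symm
  · apply List.map_congr_left
    intro i hi
    simp only [List.mem_range] at hi
    exact (natRow_double_high hi).symm

theorem intMat_natMat (m : Nat) : intMat ((2 ^ m : Nat) : Int) = natMat m := by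
  unfold intMat intRow natMat natRow
  rw [PySem.List.pyRange_one]
  simp only [Int.sub_zero, Int.toNat_natCast, List.map_map, zero_add]
  apply List.map_congr_left
  intro i hi
  apply List.map_congr_left
  intro j hj
  have h : Int.land (i : Int) (j : Int) = ((i &&& j : Nat) : Int) := rfl
  simp [h]

theorem sizeLoop_ge : ∀ (t : Nat) (n S : Int) (hS : 0 < S), (n - S).toNat ≤ t →
    S ≤ sizeLoop n S hS := by
  intro t
  induction t with
  | zero =>
    intro n S hS ht
    rw [sizeLoop]
    split
    · omega
    · omega
  | succ t ih =>
    intro n S hS ht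
    rw [sizeLoop]
    split
    · rename_i h
      have := ih n (2 * S) (by omega) (by omega)
      omega
    · omega

theorem loop_eq : ∀ (t : Nat) (n i : Int) (m : Nat) (hi : 4 ≤ i) (h0 : 0 < i),
    i = ((2 ^ m : Nat) : Int) → (n - i).toNat ≤ t →
    blockLoop n (natMat m) (natMat m) i hi = intMat (sizeLoop n i h0) := by
  intro t
  induction t with
  | zero =>
    intro n i m hi h0 hm ht
    rw [blockLoop, sizeLoop]
    split
    · omega
    · rw [hm, intMat_natMat]
  | succ t ih =>
    intro n i m hi h0 hm ht
    rw [blockLoop, sizeLoop]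
    split
    · rw [blockDouble_natMat]
      have h2 : 2 * i = ((2 ^ (m + 1) : Nat) : Int) := by
        rw [hm]; push_cast [pow_succ]; ring
      rw [ih n (2 * i) (m + 1) (by omega) (by omega) h2 (by omega)]
    · rw [hm, intMat_natMat]

theorem base_natMat :
    ([[1,1,1,1],[1,0,1,0],[1,1,0,0],[1,0,0,0]] : List (List Int)) = natMat 2 := by
  decide

-- ===== VERDICT (by name: the statement is the Claim_ definition above) =====
theorem block_spec : Claim_equal_block := by
  intro n _
  unfold Spec_block block block_alt
  rw [blockLoop]
  split
  · rename_i h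
    -- loop entered at least once: result is the closed-form matrix minus row 0
    rw [base_natMat, blockDouble_natMat]
    have h8 : (2 * 4 : Int) = ((2 ^ (2 + 1) : Nat) : Int) := by norm_num
    rw [loop_eq ((n - 2 * 4).toNat) n (2 * 4) (2 + 1) (by norm_num) (by norm_num) h8
        (le_refl _)]
    rw [if_neg (by omega)]
    have hsz : sizeLoop n 4 (by norm_num) = sizeLoop n (2 * 4) (by norm_num) := by
      rw [sizeLoop, dif_pos (by omega : (4:Int) < n)]
    have hS : (0:Int) < sizeLoop n (2 * 4) (by norm_num) := by
      have := sizeLoop_ge ((n - 2 * 4).toNat) n (2 * 4) (by norm_num) (le_refl _)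
      omega
    rw [hsz]
    unfold intMat intRow
    have hS8 : (0:Int) < sizeLoop n 8 (by norm_num) := hS
    rw [PySem.List.slice_from_one, PySem.List.pyRange_one_cons hS]
    simp
    intro a h1 h2
    rw [PySem.List.pyRange_one_cons hS8]
    simp
  · -- loop never entered: A returns [][1:] = [], B returns []
    rw [if_pos (by omega)]
    simp [PySem.List.slice_from_one]
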